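-- pv_equiv track=rewrite | github.com/harrychangjr/python-fundamentals | recursion-iteration.py | star_wars_iterative
-- ===== SOURCE A (Python) =====
-- def star_wars_iterative(num_enemy_ships):
--     n = num_enemy_ships
--     count = 1
--     pic1,pic2 = '*-','*--'
--     if n == 0:
--         return ''
--     if n % 2 == 0:
--         output = pic2
--     else:
--         output = pic1
--     while count < n:
--         output = pic1 + pic2
--         pic1, pic2 = pic2, pic1
--         count = count + 1
--     if n%2==0:
--         return (n//2)*output
--     else:
--         return pic1 + (n//2)*output
-- ===== SOURCE B (Python) =====
-- def star_wars_iterative(num_enemy_ships):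
--     n = num_enemy_ships
--     if n == 0:
--         return ''
--     if n % 2 == 0:
--         return (n // 2) * '*-*--'
--     return '*-' + (n // 2) * '*--*-'
-- ===== Notes on version B (the rewrite author's own statement) =====
-- stated objective: simpler
-- what changed: Replaces A's while-loop with swapping pattern variables by a direct parity dispatch that repeats the closed-form unit string ('*-*--' for even n, '*-' plus repeats of '*--*-' for odd n).
import Mathlib
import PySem

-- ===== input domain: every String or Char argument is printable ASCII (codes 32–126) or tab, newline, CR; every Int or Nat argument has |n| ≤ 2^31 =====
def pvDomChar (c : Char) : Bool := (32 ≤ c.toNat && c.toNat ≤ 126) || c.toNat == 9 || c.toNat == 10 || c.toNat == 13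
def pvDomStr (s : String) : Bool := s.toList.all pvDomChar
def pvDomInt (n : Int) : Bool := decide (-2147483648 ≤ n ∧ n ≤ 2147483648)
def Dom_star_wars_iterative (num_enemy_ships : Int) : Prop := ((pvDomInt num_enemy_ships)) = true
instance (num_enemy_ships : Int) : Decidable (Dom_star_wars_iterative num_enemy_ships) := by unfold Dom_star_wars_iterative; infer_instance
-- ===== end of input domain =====

-- B replaces A's while-loop with variable swapping by a direct parity dispatch on a
-- closed-form repeated unit string (objective: simpler).

-- Python's  (k : int) * (s : str)  — shared primitive used by both ports.
def pyStrMul (k : Int) (s : String) : String := String.ofList (PySem.List.pyRepeat s.toList k)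

-- ===== PORT A =====
-- the while loop: state (output, pic1, pic2); each iteration sets output := pic1 ++ pic2
-- and swaps pic1, pic2; runs (n - 1).toNat times (count goes 1 .. n-1 while count < n).
def starLoopA : Nat → String × String × String → String × String × String
  | 0, st => st
  | k+1, (_output, p1, p2) => starLoopA k (p1 ++ p2, p2, p1)

def star_wars_iterative (num_enemy_ships : Int) : String :=
  let n := num_enemy_ships
  let pic1 := "*-"
  let pic2 := "*--"
  if n = 0 then ""
  else
    let output := if PySem.Int.mod n 2 = 0 then pic2 else pic1
    let st := starLoopA (n - 1).toNat (output, pic1, pic2)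
    let output := st.1
    let pic1 := st.2.1
    if PySem.Int.mod n 2 = 0 then pyStrMul (PySem.Int.floordiv n 2) output
    else pic1 ++ pyStrMul (PySem.Int.floordiv n 2) output

-- ===== PORT B =====
def star_wars_iterative_alt (num_enemy_ships : Int) : String :=
  let n := num_enemy_ships
  if n = 0 then ""
  else if PySem.Int.mod n 2 = 0 then pyStrMul (PySem.Int.floordiv n 2) "*-*--"
  else "*-" ++ pyStrMul (PySem.Int.floordiv n 2) "*--*-"

-- ===== PRECONDITION & SPEC =====
def Spec_star_wars_iterative (num_enemy_ships : Int) (out : String) : Prop := out = star_wars_iterative_alt num_enemy_ships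
instance (num_enemy_ships : Int) (out : String) : Decidable (Spec_star_wars_iterative num_enemy_ships out) := by unfold Spec_star_wars_iterative; infer_instance

-- ===== CLAIM (what is proved, stated in full; the proofs are below) =====
def Claim_equal_star_wars_iterative : Prop := ∀ (num_enemy_ships : Int), Dom_star_wars_iterative num_enemy_ships → Spec_star_wars_iterative num_enemy_ships (star_wars_iterative num_enemy_ships)

-- ===== LEMMAS AND PROOFS =====

-- odd number of iterations: final output is pic1 ++ pic2, pics swapped once net
theorem starLoopA_odd (k : Nat) (o p1 p2 : String) :
    starLoopA (2 * k + 1) (o, p1, p2) = (p1 ++ p2, p2, p1) := by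
  induction k generalizing o p1 p2 with
  | zero => rfl
  | succ k ih =>
    have h : 2 * (k + 1) + 1 = (2 * k + 1) + 1 + 1 := by ring
    rw [h]
    show starLoopA (2 * k + 1) (p2 ++ p1, p1, p2) = (p1 ++ p2, p2, p1)
    exact ih _ _ _

-- positive even number of iterations: final output is pic2 ++ pic1, pics restored
theorem starLoopA_even_pos (k : Nat) (o p1 p2 : String) :
    starLoopA (2 * (k + 1)) (o, p1, p2) = (p2 ++ p1, p1, p2) := by
  have h : 2 * (k + 1) = (2 * k + 1) + 1 := by ring
  rw [h]
  show starLoopA (2 * k + 1) (p1 ++ p2, p2, p1) = (p2 ++ p1, p1, p2)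
  exact starLoopA_odd k _ _ _

-- ===== VERDICT (by name: the statement is the Claim_ definition above) =====
theorem star_wars_iterative_spec : Claim_equal_star_wars_iterative := by
  intro n _
  unfold Spec_star_wars_iterative star_wars_iterative star_wars_iterative_alt
  by_cases h0 : n = 0
  · simp [h0]
  · simp only [h0, if_false]
    by_cases hn : 1 ≤ n
    · -- n ≥ 1 : the loop runs (n-1).toNat times
      have hm : PySem.Int.mod n 2 = n % 2 := PySem.Int.mod_eq_emod_of_pos (by norm_num)
      rcases Int.even_or_odd n with ⟨c, hc⟩ | ⟨c, hc⟩
      · -- n even, n = 2c with c ≥ 1; iterations n-1 = 2(c-1)+1, odd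
        have hmod : PySem.Int.mod n 2 = 0 := by rw [hm]; omega
        have htoNat : (n - 1).toNat = 2 * (c - 1).toNat + 1 := by omega
        rw [hmod]
        simp only [htoNat, starLoopA_odd]
        norm_num
        rfl
      · -- n odd, n = 2c+1; iterations n-1 = 2c, even
        have hmod : PySem.Int.mod n 2 = 1 := by rw [hm]; omega
        rw [hmod]
        simp only [(by norm_num : ((1:Int) = 0) = False), if_false]
        by_cases hc0 : c = 0
        · -- n = 1 : loop does not run
          have hn1 : n = 1 := by omega
          subst hn1
          decide
        · -- n ≥ 3 : loop runs 2c ≥ 2 times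
          have htoNat : (n - 1).toNat = 2 * ((c - 1).toNat + 1) := by omega
          rw [htoNat, starLoopA_even_pos]
          rfl
    · -- n < 0 : the loop does not run, and (n//2)*s is the empty string
      have htoNat : (n - 1).toNat = 0 := by omega
      have heq : PySem.Int.floordiv n 2 = n / 2 :=
        PySem.Int.floordiv_eq_ediv_of_pos (by norm_num)
      have hfz : (n / 2).toNat = 0 := by omega
      have hrep : ∀ s : String, pyStrMul (PySem.Int.floordiv n 2) s = "" := by
        intro s
        rw [heq]
        simp [pyStrMul, PySem.List.pyRepeat, hfz]
      simp only [htoNat, starLoopA]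
      split_ifs <;> rw [hrep, hrep]
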